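-- pv_equiv track=rewrite | github.com/koii-network/prometheus-beta | src/min_steps_to_target_sum.py | min_steps_to_target_sum
-- ===== SOURCE A (Python) =====
-- from typing import List, Optional
--
-- def min_steps_to_target_sum(numbers: List[int], target: int) -> Optional[int]:
--     """
--     Calculate the minimum number of steps to reach the target sum using each number only once.
--
--     Args:
--         numbers (List[int]): List of integers to use for reaching the target
--         target (int): The target sum to reach
--
--     Returns:
--         Optional[int]: Minimum number of steps to reach the target, or None if impossible
--
--     Time Complexity: O(2^n), where n is the length of numbers
--     Space Complexity: O(n)
--     """
--     def backtrack(index: int, current_sum: int, steps: int) -> Optional[int]: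
--         # Base case: if we've reached the target sum
--         if current_sum == target:
--             return steps
--
--         # If we've gone through all numbers and haven't reached the target
--         if index >= len(numbers):
--             return None
--
--         # Try adding the current number
--         add_result = backtrack(index + 1, current_sum + numbers[index], steps + 1)
--
--         # Try subtracting the current number
--         sub_result = backtrack(index + 1, current_sum - numbers[index], steps + 1)
--
--         # Return the minimum steps, prioritizing a valid result
--         if add_result is not None and sub_result is not None:
--             return min(add_result, sub_result)
--         elif add_result is not None:
--             return add_result
--         elif sub_result is not None:
--             return sub_result
--
--         return None
--
--     # Handle edge cases
--     if not numbers: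
--         return None
--
--     # Try starting from each index to find minimum steps
--     min_steps = float('inf')
--     found_solution = False
--
--     for start_index in range(len(numbers)):
--         result = backtrack(start_index, 0, 0)
--         if result is not None:
--             min_steps = min(min_steps, result)
--             found_solution = True
--
--     return min_steps if found_solution else None
-- ===== SOURCE B (Python) =====
-- from typing import List, Optional
--
-- def min_steps_to_target_sum(numbers: List[int], target: int) -> Optional[int]:
--     """Breadth-first layered search with set deduplication instead of A's
--     exhaustive double-branch recursion: from each start index, grow the set of
--     reachable signed sums one element at a time and stop at the first layer
--     containing the target."""
--     if not numbers:
--         return None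
--     if target == 0:
--         return 0
--     best = None
--     for i in range(len(numbers)):
--         sums = {0}
--         k = 0
--         for x in numbers[i:]:
--             k += 1
--             sums = {s + x for s in sums} | {s - x for s in sums}
--             if target in sums:
--                 if best is None or k < best:
--                     best = k
--                 break
--     return best
-- ===== Notes on version B (the rewrite author's own statement) =====
-- stated objective: faster
-- what changed: Replaces A's exhaustive depth-first double-branch recursion (which always explores all 2^(n-i) sign paths from every start index) by, per start index, an iterative breadth-first layered search that maintains the SET of reachable signed sums, stops at the first layer containing the target, and shortcuts the empty list and target 0.
import Mathlib
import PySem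

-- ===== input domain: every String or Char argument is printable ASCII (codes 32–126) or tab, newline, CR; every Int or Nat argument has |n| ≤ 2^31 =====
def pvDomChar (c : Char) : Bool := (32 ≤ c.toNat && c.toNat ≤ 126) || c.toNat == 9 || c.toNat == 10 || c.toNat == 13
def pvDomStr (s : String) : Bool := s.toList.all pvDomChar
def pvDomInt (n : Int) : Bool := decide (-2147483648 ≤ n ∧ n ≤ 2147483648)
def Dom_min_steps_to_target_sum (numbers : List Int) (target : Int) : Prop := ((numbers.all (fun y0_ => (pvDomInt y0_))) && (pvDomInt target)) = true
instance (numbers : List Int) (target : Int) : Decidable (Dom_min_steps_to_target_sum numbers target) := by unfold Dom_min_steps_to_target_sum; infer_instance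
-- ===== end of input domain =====

-- B replaces A's exhaustive double-branch recursion by a per-start breadth-first layered
-- search over the SET of reachable signed sums (objective: faster; a timing run measured it).

-- ===== PORT A =====
-- backtrack(index, current_sum, steps); index only ever holds 0..len, so it is a Nat here.
-- numbers[index] is guarded by 'index >= len(numbers)' in the code, so getD is exact.
def pvBacktrack (numbers : List Int) (target : Int) (index : Nat) (currentSum : Int) (steps : Int) : Option Int :=
  if currentSum = target then some steps
  else if numbers.length ≤ index then none
  else
    let addResult := pvBacktrack numbers target (index + 1) (currentSum + numbers.getD index 0) (steps + 1)
    let subResult := pvBacktrack numbers target (index + 1) (currentSum - numbers.getD index 0) (steps + 1)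
    match addResult, subResult with
    | some a, some b => some (min a b)
    | some a, none => some a
    | none, some b => some b
    | none, none => none
termination_by numbers.length - index
decreasing_by all_goals omega

-- min_steps = float('inf') together with found_solution is modelled as an Option Int
-- accumulator (none = not found yet); exact, since min_steps is only returned when found_solution.
def min_steps_to_target_sum (numbers : List Int) (target : Int) : Option Int :=
  if numbers = [] then none
  else
    (List.range numbers.length).foldl
      (fun acc startIndex =>
        match pvBacktrack numbers target startIndex 0 0 with
        | none => acc
        | some r =>
          match acc with
          | none => some r
          | some m => some (min m r))
      none

-- ===== PORT B =====
-- sums = {s+x for s in sums} | {s-x for s in sums}; only membership tests and further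
-- set-building consume the set, so the (unmodelled) hash order never matters.
def pvLayer (sums : PySem.Set Int) (x : Int) : PySem.Set Int :=
  PySem.Set.union (PySem.Set.ofList (sums.map (fun s => s + x))) (sums.map (fun s => s - x))

-- the inner 'for x in numbers[i:]' loop with its counter k and early break
def pvScanB (target : Int) (sums : PySem.Set Int) (k : Int) : List Int → Option Int
  | [] => none
  | x :: rest =>
    let sums' := pvLayer sums x
    if target ∈ sums' then some (k + 1) else pvScanB target sums' (k + 1) rest

-- numbers[i:] for 0 ≤ i is exactly List.drop i
def min_steps_to_target_sum_alt (numbers : List Int) (target : Int) : Option Int :=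
  if numbers = [] then none
  else if target = 0 then some 0
  else
    (List.range numbers.length).foldl
      (fun best i =>
        match pvScanB target (PySem.Set.ofList [0]) 0 (numbers.drop i) with
        | none => best
        | some k =>
          match best with
          | none => some k
          | some m => if k < m then some k else best)
      none

-- ===== PRECONDITION & SPEC =====
def Spec_min_steps_to_target_sum (numbers : List Int) (target : Int) (out : Option Int) : Prop := out = min_steps_to_target_sum_alt numbers target
instance (numbers : List Int) (target : Int) (out : Option Int) : Decidable (Spec_min_steps_to_target_sum numbers target out) := by unfold Spec_min_steps_to_target_sum; infer_instance

-- ===== CLAIM (what is proved, stated in full; the proofs are below) =====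
def Claim_equal_min_steps_to_target_sum : Prop := ∀ (numbers : List Int) (target : Int), Dom_min_steps_to_target_sum numbers target → Spec_min_steps_to_target_sum numbers target (min_steps_to_target_sum numbers target)

-- ===== LEMMAS AND PROOFS =====

-- the min-of-two-optional-results combination A uses
def omin : Option Int → Option Int → Option Int
  | some a, some b => some (min a b)
  | some a, none => some a
  | none, some b => some b
  | none, none => none

-- minimal depth ≥ 0 at which target is reached as cur plus a signed sum of a prefix of l
def firstK (target : Int) : List Int → Int → Option Int
  | [], cur => if cur = target then some 0 else none
  | x :: xs, cur =>
    if cur = target then some 0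
    else (omin (firstK target xs (cur + x)) (firstK target xs (cur - x))).map (· + 1)

-- same, but a depth-0 hit is not counted (B tests membership only after the first step)
def posK (target : Int) : List Int → Int → Option Int
  | [], _ => none
  | x :: xs, s => (omin (firstK target xs (s + x)) (firstK target xs (s - x))).map (· + 1)

def minOver (L : List (Option Int)) : Option Int := L.foldr omin none

theorem minOver_cons (x : Option Int) (xs : List (Option Int)) :
    minOver (x :: xs) = omin x (minOver xs) := rfl

theorem omin_none_left (o : Option Int) : omin none o = o := by cases o <;> rfl

theorem omin_assoc (a b c : Option Int) : omin (omin a b) c = omin a (omin b c) := by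
  cases a <;> cases b <;> cases c <;> simp [omin, min_assoc]

theorem omin_map_add (a b : Option Int) (c : Int) :
    omin (a.map (· + c)) (b.map (· + c)) = (omin a b).map (· + c) := by
  cases a <;> cases b <;> simp [omin]

theorem minOver_eq_none_iff (L : List (Option Int)) :
    minOver L = none ↔ ∀ o ∈ L, o = none := by
  induction L with
  | nil => simp [minOver]
  | cons x xs ih =>
    rw [minOver_cons]
    cases x <;> cases h : minOver xs <;> simp_all [omin]
    exact ih

theorem minOver_eq_some_iff (L : List (Option Int)) (m : Int) :
    minOver L = some m ↔ (some m ∈ L ∧ ∀ v : Int, some v ∈ L → m ≤ v) := by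
  induction L generalizing m with
  | nil => simp [minOver]
  | cons x xs ih =>
    rw [minOver_cons]
    cases x with
    | none =>
      cases h : minOver xs with
      | none =>
        have hall := (minOver_eq_none_iff xs).mp h
        simp only [omin, List.mem_cons]
        constructor
        · intro hh; cases hh
        · rintro ⟨hm | hm, _⟩
          · cases hm
          · cases hall _ hm
      | some w =>
        have hw := (ih w).mp h
        simp only [omin, List.mem_cons, Option.some.injEq]
        constructor
        · rintro rfl
          refine ⟨Or.inr hw.1, ?_⟩
          rintro v (hv | hv)
          · cases hv
          · exact hw.2 v hv
        · rintro ⟨hm | hm, hlb⟩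
          · cases hm
          · have h1 : m ≤ w := hlb w (Or.inr hw.1)
            have h2 : w ≤ m := hw.2 m hm
            omega
    | some a =>
      cases h : minOver xs with
      | none =>
        have hall := (minOver_eq_none_iff xs).mp h
        simp only [omin, List.mem_cons, Option.some.injEq]
        constructor
        · rintro rfl
          refine ⟨Or.inl rfl, ?_⟩
          rintro v (hv | hv)
          · cases hv; omega
          · cases hall _ hv
        · rintro ⟨hm | hm, hlb⟩
          · cases hm; rfl
          · cases hall _ hm
      | some w =>
        have hw := (ih w).mp h
        simp only [omin, List.mem_cons, Option.some.injEq]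
        constructor
        · rintro rfl
          rcases le_total a w with hle | hle
          · refine ⟨Or.inl (min_eq_left hle), ?_⟩
            rintro v (hv | hv)
            · cases hv; omega
            · have := hw.2 v hv; omega
          · refine ⟨Or.inr (by rw [min_eq_right hle]; exact hw.1), ?_⟩
            rintro v (hv | hv)
            · cases hv; omega
            · have := hw.2 v hv; omega
        · rintro ⟨hm | hm, hlb⟩
          · cases hm
            have h2 : m ≤ w := hlb w (Or.inr hw.1)
            omega
          · have h1 : m ≤ a := hlb a (Or.inl rfl)
            have h2 : w ≤ m := hw.2 m hm
            have h3 : m ≤ w := hlb w (Or.inr hw.1)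
            have : m = w := by omega
            subst this
            omega

theorem minOver_map_congr (f : Int → Option Int) (S L : List Int)
    (h : ∀ t, t ∈ S ↔ t ∈ L) : minOver (S.map f) = minOver (L.map f) := by
  cases hS : minOver (S.map f) with
  | none =>
    symm
    rw [minOver_eq_none_iff] at hS ⊢
    intro o ho
    simp only [List.mem_map] at ho
    obtain ⟨t, ht, rfl⟩ := ho
    exact hS _ (List.mem_map_of_mem ((h t).mpr ht))
  | some m =>
    symm
    rw [minOver_eq_some_iff] at hS ⊢
    obtain ⟨hmem, hlb⟩ := hS
    constructor
    · simp only [List.mem_map] at hmem ⊢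
      obtain ⟨t, ht, hft⟩ := hmem
      exact ⟨t, (h t).mp ht, hft⟩
    · intro v hv
      simp only [List.mem_map] at hv
      obtain ⟨t, ht, hft⟩ := hv
      exact hlb v (by simpa [List.mem_map] using ⟨t, (h t).mpr ht, hft⟩)

theorem minOver_append (a b : List (Option Int)) :
    minOver (a ++ b) = omin (minOver a) (minOver b) := by
  induction a with
  | nil => rw [List.nil_append]; exact (omin_none_left _).symm
  | cons x xs ih => rw [List.cons_append, minOver_cons, ih, minOver_cons, omin_assoc]

theorem minOver_map_omin (g h : Int → Option Int) (L : List Int) :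
    minOver (L.map (fun s => omin (g s) (h s)))
      = omin (minOver (L.map g)) (minOver (L.map h)) := by
  induction L with
  | nil => rfl
  | cons s S ih =>
    simp only [List.map_cons, minOver_cons, ih]
    cases g s <;> cases h s <;> cases minOver (S.map g) <;> cases minOver (S.map h) <;>
      simp [omin] <;> omega

theorem minOver_map_mapadd (L : List (Option Int)) (c : Int) :
    minOver (L.map (fun o => o.map (· + c))) = (minOver L).map (· + c) := by
  induction L with
  | nil => rfl
  | cons x xs ih => simp only [List.map_cons, minOver_cons, ih, omin_map_add]

theorem firstK_nonneg (target : Int) (l : List Int) : ∀ (cur v : Int),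
    firstK target l cur = some v → 0 ≤ v := by
  induction l with
  | nil =>
    intro cur v h
    unfold firstK at h
    split at h
    · cases h; omega
    · cases h
  | cons x xs ih =>
    intro cur v h
    unfold firstK at h
    split at h
    · cases h; omega
    · cases hA : firstK target xs (cur + x) <;> cases hB : firstK target xs (cur - x) <;>
        simp only [hA, hB, omin, Option.map_none, Option.map_some] at h
      · cases h
      all_goals
        cases h
        first
        | (have := ih _ _ hB; omega)
        | (have := ih _ _ hA; omega)
        | (have h1 := ih _ _ hA; have h2 := ih _ _ hB;
           simp only [min_def]; split <;> omega)

theorem firstK_eq_posK (target : Int) (l : List Int) (cur : Int) (h : cur ≠ target) :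
    firstK target l cur = posK target l cur := by
  cases l <;> simp [firstK, posK, h]

theorem pvBacktrack_eq (numbers : List Int) (target : Int) (index : Nat) (cur steps : Int) :
    pvBacktrack numbers target index cur steps
      = (firstK target (numbers.drop index) cur).map (fun v => steps + v) := by
  rw [pvBacktrack]
  by_cases hc : cur = target
  · rw [if_pos hc]
    cases numbers.drop index <;> simp [firstK, hc]
  · rw [if_neg hc]
    by_cases hlen : numbers.length ≤ index
    · rw [if_pos hlen, List.drop_eq_nil_of_le hlen]
      simp [firstK, hc]
    · rw [if_neg hlen]
      replace hlen : index < numbers.length := by omega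
      have hd : numbers.drop index = numbers[index] :: numbers.drop (index + 1) :=
        List.drop_eq_getElem_cons hlen
      have hgd : numbers.getD index 0 = numbers[index] := List.getD_eq_getElem _ _ hlen
      rw [hd]
      simp only [firstK, if_neg hc, hgd]
      rw [pvBacktrack_eq numbers target (index + 1) (cur + numbers[index]) (steps + 1),
          pvBacktrack_eq numbers target (index + 1) (cur - numbers[index]) (steps + 1)]
      cases firstK target (numbers.drop (index + 1)) (cur + numbers[index]) <;>
        cases firstK target (numbers.drop (index + 1)) (cur - numbers[index]) <;>
        simp [omin] <;> omega
termination_by numbers.length - index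
decreasing_by all_goals omega

theorem pvScanB_eq (target : Int) (l : List Int) : ∀ (S : PySem.Set Int) (k : Int),
    pvScanB target S k l = (minOver (S.map (posK target l))).map (fun v => k + v) := by
  induction l with
  | nil =>
    intro S k
    have : minOver (S.map (posK target [])) = none := by
      rw [minOver_eq_none_iff]
      intro o ho
      simp only [List.mem_map] at ho
      obtain ⟨t, _, rfl⟩ := ho
      rfl
    simp [pvScanB, this]
  | cons x xs ih =>
    intro S k
    have hmem : ∀ t, t ∈ pvLayer S x ↔ t ∈ S.map (fun s => s + x) ++ S.map (fun s => s - x) := by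
      intro t
      simp [pvLayer, PySem.Set.mem_union, PySem.Set.mem_ofList, List.mem_append]
    have hR : minOver (S.map (posK target (x :: xs)))
        = (minOver ((S.map (fun s => s + x) ++ S.map (fun s => s - x)).map (firstK target xs))).map (· + 1) := by
      have h1 : S.map (posK target (x :: xs))
          = (S.map (fun s => omin (firstK target xs (s + x)) (firstK target xs (s - x)))).map
              (fun o => o.map (· + 1)) := by
        rw [List.map_map]; rfl
      rw [h1, minOver_map_mapadd, minOver_map_omin, List.map_append, ← minOver_append,
          List.map_map, List.map_map]
      rfl
    by_cases ht : target ∈ pvLayer S x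
    · have hL : target ∈ S.map (fun s => s + x) ++ S.map (fun s => s - x) := (hmem target).mp ht
      have h0 : minOver ((S.map (fun s => s + x) ++ S.map (fun s => s - x)).map (firstK target xs))
          = some 0 := by
        rw [minOver_eq_some_iff]
        constructor
        · simp only [List.mem_map]
          exact ⟨target, hL, by cases xs <;> simp [firstK]⟩
        · intro v hv
          simp only [List.mem_map] at hv
          obtain ⟨t, _, hf⟩ := hv
          exact firstK_nonneg target xs t v hf
      rw [pvScanB]
      simp only [ht, if_true, hR, h0]
      simp
    · have hL : target ∉ S.map (fun s => s + x) ++ S.map (fun s => s - x) :=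
        fun hl => ht ((hmem target).mpr hl)
      have hc : (S.map (fun s => s + x) ++ S.map (fun s => s - x)).map (firstK target xs)
          = (S.map (fun s => s + x) ++ S.map (fun s => s - x)).map (posK target xs) :=
        List.map_congr_left (fun t htL => firstK_eq_posK target xs t (fun h => hL (h ▸ htL)))
      have hset : minOver ((pvLayer S x).map (posK target xs))
          = minOver ((S.map (fun s => s + x) ++ S.map (fun s => s - x)).map (posK target xs)) :=
        minOver_map_congr _ _ _ hmem
      rw [pvScanB]
      simp only [ht, if_false, ih (pvLayer S x) (k + 1), hset, hR, hc]
      cases minOver ((S.map (fun s => s + x) ++ S.map (fun s => s - x)).map (posK target xs)) <;>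
        simp <;> omega

-- ===== VERDICT (by name: the statement is the Claim_ definition above) =====
theorem min_steps_to_target_sum_spec : Claim_equal_min_steps_to_target_sum := by
  intro numbers target _hdom
  unfold Spec_min_steps_to_target_sum min_steps_to_target_sum min_steps_to_target_sum_alt
  by_cases hnil : numbers = []
  · simp [hnil]
  · rw [if_neg hnil, if_neg hnil]
    by_cases ht0 : target = 0
    · subst ht0
      rw [if_pos rfl]
      have hval : ∀ i : Nat, pvBacktrack numbers 0 i 0 0 = some 0 := by
        intro i; rw [pvBacktrack]; simp
      have hstep : ∀ L : List Nat,
          L.foldl (fun acc startIndex =>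
            match pvBacktrack numbers 0 startIndex 0 0 with
            | none => acc
            | some r => match acc with
              | none => some r
              | some m => some (min m r)) (some 0) = some 0 := by
        intro L
        induction L with
        | nil => rfl
        | cons i L ih => simp [List.foldl_cons, hval i, ih]
      obtain ⟨m, hm⟩ : ∃ m, numbers.length = m + 1 := by
        have := List.length_pos_of_ne_nil hnil; exact ⟨numbers.length - 1, by omega⟩
      rw [hm, List.range_succ_eq_map]
      simp only [List.foldl_cons, hval 0]
      exact hstep _
    · rw [if_neg ht0]
      have hv : ∀ i : Nat, pvBacktrack numbers target i 0 0
          = pvScanB target (PySem.Set.ofList [0]) 0 (numbers.drop i) := by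
        intro i
        rw [pvBacktrack_eq, pvScanB_eq]
        have hset : PySem.Set.ofList ([0] : List Int) = [0] := rfl
        rw [hset]
        have : minOver ([0].map (posK target (numbers.drop i)))
            = posK target (numbers.drop i) 0 := by
          simp only [List.map_cons, List.map_nil, minOver_cons]
          cases posK target (numbers.drop i) 0
          · rfl
          · rfl
        rw [this, firstK_eq_posK target _ 0 (fun h => ht0 h.symm)]
      have hfold : ∀ (L : List Nat) (acc : Option Int),
          L.foldl (fun acc startIndex =>
            match pvBacktrack numbers target startIndex 0 0 with
            | none => acc
            | some r => match acc with
              | none => some r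
              | some m => some (min m r)) acc
          = L.foldl (fun best i =>
            match pvScanB target (PySem.Set.ofList [0]) 0 (numbers.drop i) with
            | none => best
            | some k => match best with
              | none => some k
              | some m => if k < m then some k else best) acc := by
        intro L
        induction L with
        | nil => intro acc; rfl
        | cons i L ih =>
          intro acc
          simp only [List.foldl_cons]
          rw [← ih]
          congr 1
          rw [hv i]
          cases pvScanB target (PySem.Set.ofList [0]) 0 (numbers.drop i) with
          | none => rfl
          | some r =>
            cases acc with
            | none => rfl
            | some m =>
              simp only []
              split <;> simp [min_def] <;> omega
      exact hfold _ none
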